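-- pv_equiv track=rewrite | github.com/CHRIS5992/HnM_Stock_App | utils/analytics.py | get_top_drivers
-- ===== SOURCE A (Python) =====
-- def get_top_drivers(contributions: dict) -> tuple[list, list]:
--     """
--     Identify top positive and negative drivers from contributions.
--
--     Args:
--         contributions: Dict from analyze_feature_contributions
--
--     Returns:
--         Tuple of (positive_drivers, negative_drivers)
--     """
--     positive = []
--     negative = []
--
--     strength_order = {'strong': 3, 'moderate': 2, 'weak': 1, 'normal': 1}
--
--     for feature, info in contributions.items():
--         direction = info.get('direction', 'neutral')
--         strength = info.get('strength', 'weak')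
--         score = strength_order.get(strength, 1)
--
--         if direction == 'positive':
--             positive.append((feature, score, info))
--         elif direction == 'negative':
--             negative.append((feature, score, info))
--         elif direction == 'expanding' and feature == 'volatility':
--             # Expanding volatility is typically negative for prediction confidence
--             negative.append((feature, score, info))
--
--     # Sort by strength score
--     positive.sort(key=lambda x: x[1], reverse=True)
--     negative.sort(key=lambda x: x[1], reverse=True)
--
--     return positive, negative
-- ===== SOURCE B (Python) =====
-- def get_top_drivers(contributions: dict) -> tuple[list, list]:
--     """Bucket variant: scores can only be 3/2/1, so instead of sorting at the
--     end, drop each entry into a per-score bucket during the single pass and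
--     concatenate buckets 3+2+1; this reproduces the stable reverse sort."""
--     strength_order = {'strong': 3, 'moderate': 2, 'weak': 1, 'normal': 1}
--     pos = ([], [], [])  # buckets for score 3, 2, 1
--     neg = ([], [], [])
--     for feature, info in contributions.items():
--         direction = info.get('direction', 'neutral')
--         score = strength_order.get(info.get('strength', 'weak'), 1)
--         if direction == 'positive':
--             target = pos
--         elif direction == 'negative' or (direction == 'expanding' and feature == 'volatility'):
--             target = neg
--         else:
--             continue
--         if score == 3:
--             target[0].append((feature, score, info))
--         elif score == 2:
--             target[1].append((feature, score, info))
--         else: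
--             target[2].append((feature, score, info))
--     return pos[0] + pos[1] + pos[2], neg[0] + neg[1] + neg[2]
-- ===== Notes on version B (the rewrite author's own statement) =====
-- stated objective: alternative
-- what changed: The final comparison sorts (list.sort key=score reverse=True) are removed entirely: since scores can only be 3, 2 or 1, B drops each entry into a per-score bucket during the single partition pass and concatenates buckets 3+2+1, which reproduces the stable reverse sort exactly.
import Mathlib
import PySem

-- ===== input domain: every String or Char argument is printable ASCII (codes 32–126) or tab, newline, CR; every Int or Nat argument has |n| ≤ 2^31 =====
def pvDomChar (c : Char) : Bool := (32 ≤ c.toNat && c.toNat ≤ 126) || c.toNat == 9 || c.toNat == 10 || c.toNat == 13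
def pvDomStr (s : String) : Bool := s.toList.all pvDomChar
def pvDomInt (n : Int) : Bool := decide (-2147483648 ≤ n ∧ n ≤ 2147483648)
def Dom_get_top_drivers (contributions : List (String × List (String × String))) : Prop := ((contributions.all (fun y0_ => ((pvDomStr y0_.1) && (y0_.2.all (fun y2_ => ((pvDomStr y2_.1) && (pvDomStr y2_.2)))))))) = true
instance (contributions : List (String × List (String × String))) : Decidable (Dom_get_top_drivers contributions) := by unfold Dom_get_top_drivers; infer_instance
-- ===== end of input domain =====

-- B replaces the final stable reverse sorts by per-score buckets (scores are only 3/2/1)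
-- filled in the single partition pass and concatenated 3+2+1: an alternative, sort-free decomposition.

-- shared helpers (both Pythons contain these same lines):
-- info.get(k, dflt) on the association list (first match = dict lookup under the type convention)
def pvInfoGet (info : List (String × String)) (k dflt : String) : String :=
  match info.find? (fun p => p.1 == k) with
  | some p => p.2
  | none => dflt

-- strength_order = {'strong': 3, 'moderate': 2, 'weak': 1, 'normal': 1}; strength_order.get(s, 1)
def pvStrengthScore (s : String) : Int :=
  PySem.Dict.getD (PySem.Dict.ofList [("strong", 3), ("moderate", 2), ("weak", 1), ("normal", 1)]) s 1

-- ===== PORT A =====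
-- loop body of A's for-loop (state = (positive, negative))
def pvStepA (acc : List (String × Int × (List (String × String))) × List (String × Int × (List (String × String))))
    (fi : String × List (String × String)) :
    List (String × Int × (List (String × String))) × List (String × Int × (List (String × String))) :=
  let feature := fi.1
  let info := fi.2
  let direction := pvInfoGet info "direction" "neutral"
  let strength := pvInfoGet info "strength" "weak"
  let score := pvStrengthScore strength
  if direction == "positive" then (acc.1 ++ [(feature, score, info)], acc.2)
  else if direction == "negative" then (acc.1, acc.2 ++ [(feature, score, info)])
  else if direction == "expanding" && feature == "volatility" then (acc.1, acc.2 ++ [(feature, score, info)])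
  else acc

def get_top_drivers (contributions : List (String × List (String × String))) : (List (String × Int × (List (String × String)))) × (List (String × Int × (List (String × String)))) :=
  let pn := contributions.foldl pvStepA ([], [])
  (PySem.List.sorted pn.1 (fun x => x.2.1) true, PySem.List.sorted pn.2 (fun x => x.2.1) true)

-- ===== PORT B =====
-- append the entry to the score's bucket (score is 3, 2, or else 1)
def pvBucketPut (b : List (String × Int × (List (String × String))) × List (String × Int × (List (String × String))) × List (String × Int × (List (String × String))))
    (feature : String) (score : Int) (info : List (String × String)) :
    List (String × Int × (List (String × String))) × List (String × Int × (List (String × String))) × List (String × Int × (List (String × String))) :=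
  if score == 3 then (b.1 ++ [(feature, score, info)], b.2.1, b.2.2)
  else if score == 2 then (b.1, b.2.1 ++ [(feature, score, info)], b.2.2)
  else (b.1, b.2.1, b.2.2 ++ [(feature, score, info)])

-- loop body of B's for-loop (state = (pos buckets, neg buckets))
def pvStepB (acc : (List (String × Int × (List (String × String))) × List (String × Int × (List (String × String))) × List (String × Int × (List (String × String)))) × (List (String × Int × (List (String × String))) × List (String × Int × (List (String × String))) × List (String × Int × (List (String × String)))))
    (fi : String × List (String × String)) :
    (List (String × Int × (List (String × String))) × List (String × Int × (List (String × String))) × List (String × Int × (List (String × String)))) × (List (String × Int × (List (String × String))) × List (String × Int × (List (String × String))) × List (String × Int × (List (String × String)))) :=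
  let feature := fi.1
  let info := fi.2
  let direction := pvInfoGet info "direction" "neutral"
  let score := pvStrengthScore (pvInfoGet info "strength" "weak")
  if direction == "positive" then (pvBucketPut acc.1 feature score info, acc.2)
  else if direction == "negative" || (direction == "expanding" && feature == "volatility") then
    (acc.1, pvBucketPut acc.2 feature score info)
  else acc

def get_top_drivers_alt (contributions : List (String × List (String × String))) : (List (String × Int × (List (String × String)))) × (List (String × Int × (List (String × String)))) :=
  let st := contributions.foldl pvStepB (([], [], []), ([], [], []))
  (st.1.1 ++ st.1.2.1 ++ st.1.2.2, st.2.1 ++ st.2.2.1 ++ st.2.2.2)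

-- ===== PRECONDITION & SPEC =====
def Spec_get_top_drivers (contributions : List (String × List (String × String))) (out : (List (String × Int × (List (String × String)))) × (List (String × Int × (List (String × String))))) : Prop := out = get_top_drivers_alt contributions
instance (contributions : List (String × List (String × String))) (out : (List (String × Int × (List (String × String)))) × (List (String × Int × (List (String × String))))) : Decidable (Spec_get_top_drivers contributions out) := by unfold Spec_get_top_drivers; exact instDecidableEqProd _ _

-- ===== CLAIM (what is proved, stated in full; the proofs are below) =====
def Claim_equal_get_top_drivers : Prop := ∀ (contributions : List (String × List (String × String))), Dom_get_top_drivers contributions → Spec_get_top_drivers contributions (get_top_drivers contributions)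

-- ===== LEMMAS AND PROOFS =====

-- entry type and score-filter shorthands (proof-only)
abbrev PvE := String × Int × (List (String × String))
def pvF (k : Int) (l : List PvE) : List PvE := l.filter (fun t => t.2.1 == k)

theorem pv_score_cases (s : String) :
    pvStrengthScore s = 1 ∨ pvStrengthScore s = 2 ∨ pvStrengthScore s = 3 := by
  unfold pvStrengthScore
  have hi : (PySem.Dict.ofList [("strong", (3:Int)), ("moderate", 2), ("weak", 1), ("normal", 1)]).items
      = [("strong", (3:Int)), ("moderate", 2), ("weak", 1), ("normal", 1)] := by decide
  simp only [PySem.Dict.getD, PySem.Dict.get?, hi]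
  by_cases h1 : "strong" == s
  · simp [List.find?, h1]
  by_cases h2 : "moderate" == s
  · simp [List.find?, h1, h2]
  by_cases h3 : "weak" == s
  · simp [List.find?, h1, h2, h3]
  by_cases h4 : "normal" == s
  · simp [List.find?, h1, h2, h3, h4]
  · simp [List.find?, h1, h2, h3, h4]

-- insertBy passes over a prefix it never inserts into
theorem pv_insertBy_skip {α : Type} (before : α → α → Bool) (x : α) (P S : List α)
    (h : ∀ y ∈ P, before x y = false) :
    PySem.List.insertBy before x (P ++ S) = P ++ PySem.List.insertBy before x S := by
  induction P with
  | nil => simp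
  | cons p ps ih =>
    simp only [List.cons_append, PySem.List.insertBy, h p (by simp)]
    simp [ih (fun y hy => h y (by simp [hy]))]

-- insertBy puts x in front when it goes before every element
theorem pv_insertBy_front {α : Type} (before : α → α → Bool) (x : α) (S : List α)
    (h : ∀ y ∈ S, before x y = true) :
    PySem.List.insertBy before x S = x :: S := by
  cases S with
  | nil => rfl
  | cons y ys => simp [PySem.List.insertBy, h y (by simp)]

-- the stable reverse insertion sort over {1,2,3}-keyed entries is exactly bucket concatenation
theorem pv_sort_buckets (l : List PvE) (hl : ∀ t ∈ l, t.2.1 = 1 ∨ t.2.1 = 2 ∨ t.2.1 = 3) :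
    ∀ b3 b2 b1 : List PvE, (∀ t ∈ b3, t.2.1 = 3) → (∀ t ∈ b2, t.2.1 = 2) → (∀ t ∈ b1, t.2.1 = 1) →
    List.foldl (fun acc x => PySem.List.insertBy (fun a b => decide (b.2.1 < a.2.1)) x acc) (b3 ++ b2 ++ b1) l
      = (b3 ++ pvF 3 l) ++ (b2 ++ pvF 2 l) ++ (b1 ++ pvF 1 l) := by
  induction l with
  | nil => intro b3 b2 b1 _ _ _; simp [pvF]
  | cons x xs ih =>
    intro b3 b2 b1 h3 h2 h1
    have hx := hl x (by simp)
    have hxs : ∀ t ∈ xs, t.2.1 = 1 ∨ t.2.1 = 2 ∨ t.2.1 = 3 := fun t ht => hl t (by simp [ht])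
    simp only [List.foldl_cons]
    rcases hx with h | h | h
    · -- score 1: x is appended at the very end
      rw [PySem.List.insertBy_of_forall_not_before _ _ _ (by
        intro y hy
        simp only [List.mem_append] at hy
        rcases hy with (hy | hy) | hy
        · simp [h3 y hy, h]
        · simp [h2 y hy, h]
        · simp [h1 y hy, h])]
      rw [show b3 ++ b2 ++ b1 ++ [x] = b3 ++ b2 ++ (b1 ++ [x]) by simp [List.append_assoc]]
      rw [ih hxs b3 b2 (b1 ++ [x]) h3 h2 (by
        intro t ht; rcases List.mem_append.mp ht with ht | ht
        · exact h1 t ht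
        · simp at ht; simp [ht, h])]
      simp [pvF, h, List.append_assoc]
    · -- score 2: x goes right before bucket 1
      rw [show b3 ++ b2 ++ b1 = (b3 ++ b2) ++ b1 by simp [List.append_assoc]]
      rw [pv_insertBy_skip _ _ _ _ (by
        intro y hy
        rcases List.mem_append.mp hy with hy | hy
        · simp [h3 y hy, h]
        · simp [h2 y hy, h])]
      rw [pv_insertBy_front _ _ _ (fun y hy => by simp [h1 y hy, h])]
      rw [show (b3 ++ b2) ++ (x :: b1) = b3 ++ (b2 ++ [x]) ++ b1 by simp [List.append_assoc]]
      rw [ih hxs b3 (b2 ++ [x]) b1 h3 (by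
        intro t ht; rcases List.mem_append.mp ht with ht | ht
        · exact h2 t ht
        · simp at ht; simp [ht, h]) h1]
      simp [pvF, h, List.append_assoc]
    · -- score 3: x goes right after bucket 3
      rw [show b3 ++ b2 ++ b1 = b3 ++ (b2 ++ b1) by simp [List.append_assoc]]
      rw [pv_insertBy_skip _ _ _ _ (fun y hy => by simp [h3 y hy, h])]
      rw [pv_insertBy_front _ _ _ (by
        intro y hy
        rcases List.mem_append.mp hy with hy | hy
        · simp [h2 y hy, h]
        · simp [h1 y hy, h])]
      rw [show b3 ++ (x :: (b2 ++ b1)) = (b3 ++ [x]) ++ b2 ++ b1 by simp [List.append_assoc]]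
      rw [ih hxs (b3 ++ [x]) b2 b1 (by
        intro t ht; rcases List.mem_append.mp ht with ht | ht
        · exact h3 t ht
        · simp at ht; simp [ht, h]) h2 h1]
      simp [pvF, h, List.append_assoc]

-- putting an entry into its bucket = filtering the appended list
theorem pv_bucketPut_filter (P : List PvE) (feature : String) (score : Int)
    (info : List (String × String)) (h : score = 1 ∨ score = 2 ∨ score = 3) :
    pvBucketPut (pvF 3 P, pvF 2 P, pvF 1 P) feature score info
      = (pvF 3 (P ++ [(feature, score, info)]), pvF 2 (P ++ [(feature, score, info)]),
          pvF 1 (P ++ [(feature, score, info)])) := by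
  rcases h with h | h | h <;> subst h <;> simp [pvBucketPut, pvF, List.filter_append]

-- one loop step of B tracks the filters of one loop step of A
theorem pv_step_fuse (P N : List PvE) (fi : String × List (String × String)) :
    pvStepB ((pvF 3 P, pvF 2 P, pvF 1 P), (pvF 3 N, pvF 2 N, pvF 1 N)) fi
      = ((pvF 3 (pvStepA (P, N) fi).1, pvF 2 (pvStepA (P, N) fi).1, pvF 1 (pvStepA (P, N) fi).1),
          (pvF 3 (pvStepA (P, N) fi).2, pvF 2 (pvStepA (P, N) fi).2, pvF 1 (pvStepA (P, N) fi).2)) := by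
  have hs := pv_score_cases (pvInfoGet fi.2 "strength" "weak")
  simp only [pvStepA, pvStepB]
  by_cases hp : (pvInfoGet fi.2 "direction" "neutral" == "positive") = true
  · simp [hp, pv_bucketPut_filter _ _ _ _ hs]
  by_cases hn : (pvInfoGet fi.2 "direction" "neutral" == "negative") = true
  · simp [hp, hn, pv_bucketPut_filter _ _ _ _ hs]
  by_cases he : (pvInfoGet fi.2 "direction" "neutral" == "expanding" && fi.1 == "volatility") = true
  · simp [hp, hn, he, pv_bucketPut_filter _ _ _ _ hs]
  · simp [hp, hn, he]

-- the whole B loop tracks the filters of the whole A loop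
theorem pv_fuse (l : List (String × List (String × String))) :
    ∀ P N : List PvE,
    List.foldl pvStepB ((pvF 3 P, pvF 2 P, pvF 1 P), (pvF 3 N, pvF 2 N, pvF 1 N)) l
      = ((pvF 3 (List.foldl pvStepA (P, N) l).1, pvF 2 (List.foldl pvStepA (P, N) l).1,
            pvF 1 (List.foldl pvStepA (P, N) l).1),
          (pvF 3 (List.foldl pvStepA (P, N) l).2, pvF 2 (List.foldl pvStepA (P, N) l).2,
            pvF 1 (List.foldl pvStepA (P, N) l).2)) := by
  induction l with
  | nil => intro P N; simp
  | cons fi l ih =>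
    intro P N
    simp only [List.foldl_cons, pv_step_fuse P N fi]
    have := ih (pvStepA (P, N) fi).1 (pvStepA (P, N) fi).2
    simpa using this

-- every score A ever stores is 1, 2 or 3
theorem pv_scores (l : List (String × List (String × String))) :
    ∀ P N : List PvE, (∀ t ∈ P, t.2.1 = 1 ∨ t.2.1 = 2 ∨ t.2.1 = 3) →
    (∀ t ∈ N, t.2.1 = 1 ∨ t.2.1 = 2 ∨ t.2.1 = 3) →
    (∀ t ∈ (List.foldl pvStepA (P, N) l).1, t.2.1 = 1 ∨ t.2.1 = 2 ∨ t.2.1 = 3) ∧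
    (∀ t ∈ (List.foldl pvStepA (P, N) l).2, t.2.1 = 1 ∨ t.2.1 = 2 ∨ t.2.1 = 3) := by
  induction l with
  | nil => intro P N hP hN; exact ⟨hP, hN⟩
  | cons fi l ih =>
    intro P N hP hN
    simp only [List.foldl_cons]
    have hs := pv_score_cases (pvInfoGet fi.2 "strength" "weak")
    have hmem : (∀ t ∈ (pvStepA (P, N) fi).1, t.2.1 = 1 ∨ t.2.1 = 2 ∨ t.2.1 = 3) ∧
        (∀ t ∈ (pvStepA (P, N) fi).2, t.2.1 = 1 ∨ t.2.1 = 2 ∨ t.2.1 = 3) := by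
      simp only [pvStepA]
      split_ifs <;> constructor <;> intro t ht <;>
        first
          | exact hP t ht
          | exact hN t ht
          | (rcases List.mem_append.mp ht with ht | ht
             · first | exact hP t ht | exact hN t ht
             · simp at ht; simp [ht]; exact hs)
    have := ih (pvStepA (P, N) fi).1 (pvStepA (P, N) fi).2 hmem.1 hmem.2
    simpa using this

-- a sorted-by-score-descending list over {1,2,3} is its three buckets concatenated
theorem pv_sorted_eq (P : List PvE) (hP : ∀ t ∈ P, t.2.1 = 1 ∨ t.2.1 = 2 ∨ t.2.1 = 3) :
    PySem.List.sorted P (fun x => x.2.1) true = pvF 3 P ++ pvF 2 P ++ pvF 1 P := by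
  rw [PySem.List.sorted_rev_eq_foldl_insertBy]
  have := pv_sort_buckets P hP [] [] [] (by simp) (by simp) (by simp)
  simpa using this

-- ===== VERDICT (by name: the statement is the Claim_ definition above) =====
theorem get_top_drivers_spec : Claim_equal_get_top_drivers := by
  intro contributions _
  unfold Spec_get_top_drivers get_top_drivers get_top_drivers_alt
  dsimp only
  have hsc := pv_scores contributions [] [] (by simp) (by simp)
  have hfuse := pv_fuse contributions [] []
  simp only [pvF, List.filter_nil] at hfuse
  rw [hfuse]
  rw [pv_sorted_eq _ hsc.1, pv_sorted_eq _ hsc.2]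
  simp [pvF, List.append_assoc]
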